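-- pv_equiv track=rewrite | github.com/Infinite-Limit-Data-Science/peppermint | src/pyxycut/pdfxycut.py | _compress_columns
-- ===== SOURCE A (Python) =====
-- def _compress_columns(rows, min_populated=2):
--     """
--     Remove columns that have fewer than `min_populated` non-empty cells.
--     Returns a new list of rows.
--     """
--     if not rows:
--         return rows
--
--     max_cols = max(len(r) for r in rows)
--     counts   = [0] * max_cols
--     for r in rows:
--         for j, cell in enumerate(r):
--             if j < max_cols and cell and str(cell).strip():
--                 counts[j] += 1
--
--     keep = [j for j, c in enumerate(counts) if c >= min_populated]
--     if len(keep) == max_cols: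
--         return rows
--
--     new_rows = [[ (r[j] if j < len(r) else None) for j in keep ]
--                 for r in rows]
--
--     new_rows = [r for r in new_rows if any(cell and str(cell).strip() for cell in r)]
--     return new_rows
-- ===== SOURCE B (Python) =====
-- def _compress_columns(rows, min_populated=2):
--     """
--     Remove columns that have fewer than `min_populated` non-empty cells.
--     Column-major reimplementation: transpose first, count per column list,
--     keep the dense columns, then rebuild rows position-wise.
--     """
--     max_cols = max((len(r) for r in rows), default=0)
--     cols = [[r[j] if j < len(r) else None for r in rows] for j in range(max_cols)]
--     kept = [c for c in cols
--             if sum(1 for cell in c if cell and str(cell).strip()) >= min_populated]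
--     if len(kept) == max_cols:
--         return rows
--     new_rows = [[c[i] for c in kept] for i in range(len(rows))]
--     return [r for r in new_rows if any(cell and str(cell).strip() for cell in r)]
-- ===== Notes on version B (the rewrite author's own statement) =====
-- stated objective: alternative
-- what changed: Row-major counting with an in-place mutated counts array is replaced by a column-major pass: transpose into explicit column lists, count each column directly, keep dense columns, and rebuild the rows position-wise from the kept columns.
import Mathlib
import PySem

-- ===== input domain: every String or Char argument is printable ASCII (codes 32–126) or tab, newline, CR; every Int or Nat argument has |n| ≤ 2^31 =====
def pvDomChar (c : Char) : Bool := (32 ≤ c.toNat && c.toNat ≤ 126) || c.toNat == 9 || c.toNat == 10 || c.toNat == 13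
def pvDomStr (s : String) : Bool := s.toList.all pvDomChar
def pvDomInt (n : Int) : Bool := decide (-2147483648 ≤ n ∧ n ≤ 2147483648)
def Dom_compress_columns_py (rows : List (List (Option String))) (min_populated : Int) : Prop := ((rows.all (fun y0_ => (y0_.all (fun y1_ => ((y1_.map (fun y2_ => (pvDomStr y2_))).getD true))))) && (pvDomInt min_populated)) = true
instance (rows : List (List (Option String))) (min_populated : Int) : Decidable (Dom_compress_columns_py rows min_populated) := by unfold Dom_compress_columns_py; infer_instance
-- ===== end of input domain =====

-- B replaces A's row-major counting loop (mutating a counts array in place) by a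
-- column-major decomposition: transpose into explicit column lists, count each column
-- directly, keep the dense columns, rebuild the rows position-wise from the kept
-- columns; objective: alternative decomposition, same asymptotic cost.

-- Python truthiness of `cell and str(cell).strip()` for cell : Optional[str]
def pvTruthy (cell : Option String) : Bool :=
  match cell with
  | none => false
  | some s => (s ≠ "") && (PySem.Str.strip s ≠ "")

-- ===== PORT A =====
def compress_columns_py (rows : List (List (Option String))) (min_populated : Int) : List (List (Option String)) :=
  if rows.isEmpty then rows
  else
    let max_cols : Nat := (rows.map (·.length)).foldl max 0
    let counts : List Int := rows.foldl (fun counts r =>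
        (r.zipIdx 0).foldl (fun counts jc =>
          if jc.2 < max_cols && pvTruthy jc.1 then counts.modify jc.2 (· + 1) else counts) counts)
      (List.replicate max_cols 0)
    let keep : List Nat :=
      (counts.zipIdx 0).filterMap (fun cj => if min_populated ≤ cj.1 then some cj.2 else none)
    if keep.length = max_cols then rows
    else
      let new_rows := rows.map (fun r => keep.map (fun j => if j < r.length then r.getD j none else none))
      new_rows.filter (fun r => r.any pvTruthy)

-- ===== PORT B =====
-- transliteration of Source B: max with default, column lists, per-column count, rebuild
def compress_columns_py_alt (rows : List (List (Option String))) (min_populated : Int) : List (List (Option String)) :=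
  let max_cols : Nat := rows.foldl (fun m r => max m r.length) 0
  let cols : List (List (Option String)) :=
    (List.range max_cols).map (fun j => rows.map (fun r => if j < r.length then r.getD j none else none))
  let kept := cols.filter (fun c => min_populated ≤ (c.countP pvTruthy : Int))
  if kept.length = max_cols then rows
  else
    ((List.range rows.length).map (fun i => kept.map (fun c => c.getD i none))).filter
      (fun r => r.any pvTruthy)

-- ===== PRECONDITION & SPEC =====
def Spec_compress_columns_py (rows : List (List (Option String))) (min_populated : Int) (out : List (List (Option String))) : Prop := out = compress_columns_py_alt rows min_populated
instance (rows : List (List (Option String))) (min_populated : Int) (out : List (List (Option String))) : Decidable (Spec_compress_columns_py rows min_populated out) := by unfold Spec_compress_columns_py; infer_instance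

-- ===== CLAIM (what is proved, stated in full; the proofs are below) =====
def Claim_equal_compress_columns_py : Prop := ∀ (rows : List (List (Option String))) (min_populated : Int), Dom_compress_columns_py rows min_populated → Spec_compress_columns_py rows min_populated (compress_columns_py rows min_populated)

-- ===== LEMMAS AND PROOFS =====

theorem pvInner (m : Nat) (cells : List (Option String)) :
    ∀ (n : Nat) (counts : List Int) (j : Nat),
    ((cells.zipIdx n).foldl (fun counts jc =>
        if jc.2 < m && pvTruthy jc.1 then counts.modify jc.2 (· + 1) else counts) counts)[j]? =
      (counts[j]?).map (· + if n ≤ j ∧ j - n < cells.length ∧ j < m ∧ pvTruthy (cells.getD (j - n) none)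
        then (1 : Int) else 0) := by
  induction cells with
  | nil =>
    intro n counts j
    simp only [List.zipIdx_nil, List.foldl_nil, List.length_nil]
    have hcond : ¬ (n ≤ j ∧ j - n < 0 ∧ j < m ∧ pvTruthy (List.getD [] (j - n) none) = true) := by
      rintro ⟨-, h2, -, -⟩; omega
    rw [if_neg hcond]
    cases counts[j]? <;> simp
  | cons c cs ih =>
    intro n counts j
    rw [List.zipIdx_cons, List.foldl_cons, ih]
    by_cases hj : j = n
    · subst hj
      have h1 : ¬ (j + 1 ≤ j) := by omega
      simp only [h1, false_and, if_false]
      by_cases hc : (j < m && pvTruthy c) = true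
      · rw [if_pos hc, List.getElem?_modify]
        simp only [Bool.and_eq_true, decide_eq_true_eq] at hc
        have hcond : (j ≤ j ∧ j - j < (c :: cs).length ∧ j < m ∧ pvTruthy ((c :: cs).getD (j - j) none) = true) := by
          refine ⟨le_refl _, by simp, hc.1, ?_⟩
          have : j - j = 0 := by omega
          rw [this]; simpa using hc.2
        rw [if_pos hcond]
        cases counts[j]? <;> simp
      · rw [if_neg hc]
        simp only [Bool.not_eq_true, Bool.and_eq_false_iff, decide_eq_false_iff_not] at hc
        have hcond : ¬ (j ≤ j ∧ j - j < (c :: cs).length ∧ j < m ∧ pvTruthy ((c :: cs).getD (j - j) none) = true) := by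
          rintro ⟨-, -, h3, h4⟩
          have : j - j = 0 := by omega
          rw [this] at h4; simp at h4
          rcases hc with hc | hc
          · exact hc h3
          · rw [h4] at hc; simp at hc
        rw [if_neg hcond]
    · have hstep :
          (if (n < m && pvTruthy c) = true then counts.modify n (· + 1) else counts)[j]? = counts[j]? := by
        split
        · rw [List.getElem?_modify]
          cases counts[j]? <;> simp [Ne.symm hj]
        · rfl
      rw [hstep]
      have hcond : (n + 1 ≤ j ∧ j - (n + 1) < cs.length ∧ j < m ∧ pvTruthy (cs.getD (j - (n + 1)) none) = true)
          ↔ (n ≤ j ∧ j - n < (c :: cs).length ∧ j < m ∧ pvTruthy ((c :: cs).getD (j - n) none) = true) := by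
        constructor
        · rintro ⟨h1, h2, h3, h4⟩
          refine ⟨by omega, by simp; omega, h3, ?_⟩
          have : j - n = (j - (n+1)) + 1 := by omega
          rw [this]; simpa using h4
        · rintro ⟨h1, h2, h3, h4⟩
          refine ⟨by omega, by simp at h2; omega, h3, ?_⟩
          have : j - n = (j - (n+1)) + 1 := by omega
          rw [this] at h4; simpa using h4
      simp only [hcond]

def pvCell (j : Nat) (r : List (Option String)) : Option String :=
  if j < r.length then r.getD j none else none

theorem pvStepRow (m : Nat) (r : List (Option String)) (g : Nat → Int) :
    (r.zipIdx 0).foldl (fun counts jc =>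
        if jc.2 < m && pvTruthy jc.1 then counts.modify jc.2 (· + 1) else counts)
      ((List.range m).map g) =
    (List.range m).map (fun j => g j + if pvTruthy (pvCell j r) then (1 : Int) else 0) := by
  apply List.ext_getElem?
  intro j
  rw [pvInner]
  by_cases hj : j < m
  · rw [List.getElem?_map, List.getElem?_map, List.getElem?_range hj]
    by_cases hr : j < r.length <;> simp [pvCell, pvTruthy, hj, hr]
  · have h1 : ((List.range m).map g)[j]? = none := by
      rw [List.getElem?_eq_none] <;> simp; omega
    have h2 : ((List.range m).map (fun j => g j + if pvTruthy (pvCell j r) then (1 : Int) else 0))[j]? = none := by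
      rw [List.getElem?_eq_none] <;> simp; omega
    rw [h1, h2]; rfl

theorem pvCounts (m : Nat) (rs : List (List (Option String))) :
    ∀ (g : Nat → Int),
    rs.foldl (fun counts r =>
        (r.zipIdx 0).foldl (fun counts jc =>
          if jc.2 < m && pvTruthy jc.1 then counts.modify jc.2 (· + 1) else counts) counts)
      ((List.range m).map g) =
    (List.range m).map (fun j => g j + (rs.countP (fun r => pvTruthy (pvCell j r)) : Int)) := by
  induction rs with
  | nil => intro g; simp
  | cons r rs ih =>
    intro g
    rw [List.foldl_cons, pvStepRow, ih]
    apply List.map_congr_left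
    intro j _
    rw [List.countP_cons]
    push_cast
    by_cases h : pvTruthy (pvCell j r) <;> simp [h] <;> ring

theorem pvFilterMapIf (p : Nat → Prop) [DecidablePred p] (l : List Nat) :
    l.filterMap (fun j => if p j then some j else none) = l.filter (fun j => decide (p j)) := by
  induction l with
  | nil => rfl
  | cons a l ih => by_cases h : p a <;> simp [h, ih]

theorem pvZipIdxMapRange (m : Nat) (h : Nat → Int) :
    ((List.range m).map h).zipIdx 0 = (List.range m).map (fun j => (h j, j)) := by
  apply List.ext_getElem?
  intro k
  by_cases hk : k < m
  · simp [List.getElem?_zipIdx, List.getElem?_range hk]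
  · have hlen : ∀ (l : List (Int × Nat)), l.length = m → l[k]? = none := by
      intro l hl; rw [List.getElem?_eq_none]; omega
    rw [hlen _ (by simp), hlen _ (by simp)]

-- the common count-select-project-filter value both programs compute
def pvCanon (rows : List (List (Option String))) (mp : Int) : List (List (Option String)) :=
  let m := (rows.map (·.length)).foldl max 0
  let keep := (List.range m).filter
    (fun j => decide (mp ≤ (rows.countP (fun r => pvTruthy (pvCell j r)) : Int)))
  if keep.length = m then rows
  else (rows.map (fun r => keep.map (fun j => pvCell j r))).filter (fun r => r.any pvTruthy)

theorem pvA_eq (rows : List (List (Option String))) (mp : Int) :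
    compress_columns_py rows mp = pvCanon rows mp := by
  unfold compress_columns_py pvCanon
  dsimp only
  by_cases hnil : rows.isEmpty
  · rw [if_pos hnil]
    have : rows = [] := List.isEmpty_iff.mp hnil
    subst this
    simp
  · rw [if_neg hnil]
    have hrep : (List.replicate ((rows.map (·.length)).foldl max 0) (0 : Int)) =
        (List.range ((rows.map (·.length)).foldl max 0)).map (fun _ => (0 : Int)) := by
      rw [List.map_const', List.length_range]
    rw [hrep, pvCounts, pvZipIdxMapRange, List.filterMap_map]
    have : ((fun cj : Int × Nat => if mp ≤ cj.1 then some cj.2 else none) ∘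
        (fun j => ((fun j => (0 : Int) + (rows.countP (fun r => pvTruthy (pvCell j r)) : Int)) j, j)))
        = fun j : Nat => if mp ≤ (0 : Int) + (rows.countP (fun r => pvTruthy (pvCell j r)) : Int) then some j else none := rfl
    rw [this, pvFilterMapIf]
    simp only [zero_add, pvCell]
    rfl
theorem pvB_eq (rows : List (List (Option String))) (mp : Int) :
    compress_columns_py_alt rows mp = pvCanon rows mp := by
  unfold compress_columns_py_alt pvCanon
  dsimp only
  have hmax : rows.foldl (fun m r => max m r.length) 0 = (rows.map (·.length)).foldl max 0 := by
    rw [List.foldl_map]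
  rw [hmax]
  have hfilter :
      ((List.range ((rows.map (·.length)).foldl max 0)).map
        (fun j => rows.map (fun r => if j < r.length then r.getD j none else none))).filter
        (fun c => decide (mp ≤ (c.countP pvTruthy : Int))) =
      ((List.range ((rows.map (·.length)).foldl max 0)).filter
        (fun j => decide (mp ≤ (rows.countP (fun r => pvTruthy (pvCell j r)) : Int)))).map
        (fun j => rows.map (fun r => if j < r.length then r.getD j none else none)) := by
    rw [List.filter_map]
    congr 1
    apply List.filter_congr
    intro j _
    have hc : List.countP pvTruthy (rows.map (fun r => if j < r.length then r.getD j none else none))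
        = List.countP (fun r => pvTruthy (pvCell j r)) rows := by
      rw [List.countP_map]; rfl
    exact congrArg (fun n : Nat => decide (mp ≤ (n : Int))) hc
  rw [hfilter, List.length_map]
  by_cases hlen : ((List.range ((rows.map (·.length)).foldl max 0)).filter
        (fun j => decide (mp ≤ (rows.countP (fun r => pvTruthy (pvCell j r)) : Int)))).length
        = (rows.map (·.length)).foldl max 0
  · rw [if_pos hlen, if_pos hlen]
  · rw [if_neg hlen, if_neg hlen]
    congr 1
    apply List.ext_getElem?
    intro i
    by_cases hi : i < rows.length
    · rw [List.getElem?_map, List.getElem?_range hi, List.getElem?_map]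
      have hrows : rows[i]? = some rows[i] := List.getElem?_eq_getElem hi
      rw [hrows]
      simp only [Option.map_some]
      congr 1
      rw [List.map_map]
      apply List.map_congr_left
      intro j _
      simp only [Function.comp]
      rw [List.getD_eq_getElem?_getD, List.getElem?_map, hrows]
      simp [pvCell]
    · have h1 : ∀ (l : List (List (Option String))), l.length = rows.length → l[i]? = none := by
        intro l hl; rw [List.getElem?_eq_none]; omega
      rw [h1 _ (by simp), h1 _ (by simp)]

-- ===== VERDICT (by name: the statement is the Claim_ definition above) =====
theorem compress_columns_py_spec : Claim_equal_compress_columns_py := by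
  intro rows min_populated _
  unfold Spec_compress_columns_py
  rw [pvA_eq, pvB_eq]
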